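-- pv_equiv track=rewrite | github.com/ghkdgus29/algorithm | 분할 정복/1891.py | calculate_quadrant
-- ===== SOURCE A (Python) =====
-- def calculate_quadrant(x, y, tx, ty, size):                                   # 실제 x, y 좌표를 바탕으로 사분면 문자열을 구한다.
--     if size == 1:                                                             # tx, ty 좌표는 구하려는 좌표
--         return ''                                                             # x, y 는 현재 좌표
--
--     offset = size // 2
--     if tx >= x + offset and ty < y + offset:
--         return '1' + calculate_quadrant(x + offset, y, tx, ty, offset)
--     elif tx < x + offset and ty < y + offset:
--         return '2' + calculate_quadrant(x, y, tx, ty, offset)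
--     elif tx < x + offset and ty >= y + offset:
--         return '3' + calculate_quadrant(x, y + offset, tx, ty, offset)
--     else:
--         return '4' + calculate_quadrant(x + offset, y + offset, tx, ty, offset)
-- ===== SOURCE B (Python) =====
-- def calculate_quadrant(x, y, tx, ty, size):
--     digits = []
--     while size > 1:
--         offset = size // 2
--         if tx >= x + offset:
--             if ty < y + offset:
--                 digits.append('1')
--                 x += offset
--             else:
--                 digits.append('4')
--                 x += offset
--                 y += offset
--         else:
--             if ty < y + offset:
--                 digits.append('2')
--             else:
--                 digits.append('3')
--                 y += offset
--         size = offset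
--     return ''.join(digits)
-- ===== Notes on version B (the rewrite author's own statement) =====
-- stated objective: alternative
-- what changed: Replaced the string-prepending recursion with an iterative while-loop that nests two two-way comparisons (x-side then y-side) instead of four conjunctive branches, appends digits to a list and joins once at the end.
import Mathlib
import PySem

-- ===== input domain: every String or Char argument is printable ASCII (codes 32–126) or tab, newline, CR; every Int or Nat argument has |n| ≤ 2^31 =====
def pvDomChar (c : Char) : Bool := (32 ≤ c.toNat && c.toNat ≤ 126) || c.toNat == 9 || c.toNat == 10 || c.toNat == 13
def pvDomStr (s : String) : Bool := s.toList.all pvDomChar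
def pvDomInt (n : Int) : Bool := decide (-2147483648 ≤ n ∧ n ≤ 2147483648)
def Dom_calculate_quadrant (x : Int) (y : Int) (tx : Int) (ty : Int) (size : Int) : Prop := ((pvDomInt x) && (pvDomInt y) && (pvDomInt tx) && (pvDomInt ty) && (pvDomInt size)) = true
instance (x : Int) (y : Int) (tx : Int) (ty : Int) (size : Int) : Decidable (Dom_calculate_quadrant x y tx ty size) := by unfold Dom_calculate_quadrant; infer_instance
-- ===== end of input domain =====

-- B replaces A's four-branch string-prepending recursion by an iterative digit-list
-- accumulation with nested two-way comparisons, joined once at the end (objective: alternative).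

-- ===== PORT A =====
-- Python tests 'size == 1'; for size ≤ 0 the Python recursion never terminates
-- (excluded by Pre_), so the Lean port's 'size ≤ 1' base case is only a totalizing guard.
def calculate_quadrant (x : Int) (y : Int) (tx : Int) (ty : Int) (size : Int) : String :=
  if size ≤ 1 then ""
  else
    let offset := PySem.Int.floordiv size 2
    if tx ≥ x + offset ∧ ty < y + offset then
      "1" ++ calculate_quadrant (x + offset) y tx ty offset
    else if tx < x + offset ∧ ty < y + offset then
      "2" ++ calculate_quadrant x y tx ty offset
    else if tx < x + offset ∧ ty ≥ y + offset then
      "3" ++ calculate_quadrant x (y + offset) tx ty offset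
    else
      "4" ++ calculate_quadrant (x + offset) (y + offset) tx ty offset
termination_by size.toNat
decreasing_by
  all_goals
    rw [PySem.Int.floordiv_eq_ediv_of_pos (by omega : (0:Int) < 2)]
    omega

-- ===== PORT B =====
-- the 'while size > 1' loop of Source B: state (x, y, size, digits); totalizing guard 'size ≤ 1' = loop exit
def cqLoop (x : Int) (y : Int) (tx : Int) (ty : Int) (size : Int) (digits : List String) : List String :=
  if size ≤ 1 then digits
  else
    let offset := PySem.Int.floordiv size 2
    if tx ≥ x + offset then
      if ty < y + offset then cqLoop (x + offset) y tx ty offset (digits ++ ["1"])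
      else cqLoop (x + offset) (y + offset) tx ty offset (digits ++ ["4"])
    else
      if ty < y + offset then cqLoop x y tx ty offset (digits ++ ["2"])
      else cqLoop x (y + offset) tx ty offset (digits ++ ["3"])
termination_by size.toNat
decreasing_by
  all_goals
    rw [PySem.Int.floordiv_eq_ediv_of_pos (by omega : (0:Int) < 2)]
    omega

def calculate_quadrant_alt (x : Int) (y : Int) (tx : Int) (ty : Int) (size : Int) : String :=
  String.join (cqLoop x y tx ty size [])

-- ===== PRECONDITION & SPEC =====
-- Pre_ excludes size ≤ 0, on which the Python A recurses forever (offset = size // 2 never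
-- reaches 1) and raises RecursionError; it returns normally for every size ≥ 1.
def Pre_calculate_quadrant (x : Int) (y : Int) (tx : Int) (ty : Int) (size : Int) : Prop := 1 ≤ size
instance (x : Int) (y : Int) (tx : Int) (ty : Int) (size : Int) : Decidable (Pre_calculate_quadrant x y tx ty size) := by unfold Pre_calculate_quadrant; infer_instance
def pvWitness_calculate_quadrant : Int × Int × Int × Int × Int := (0, 0, 3, 2, 8)

def Spec_calculate_quadrant (x : Int) (y : Int) (tx : Int) (ty : Int) (size : Int) (out : String) : Prop := out = calculate_quadrant_alt x y tx ty size
instance (x : Int) (y : Int) (tx : Int) (ty : Int) (size : Int) (out : String) : Decidable (Spec_calculate_quadrant x y tx ty size out) := by unfold Spec_calculate_quadrant; infer_instance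

-- ===== CLAIM (what is proved, stated in full; the proofs are below) =====
def Claim_equal_calculate_quadrant : Prop := ∀ (x : Int) (y : Int) (tx : Int) (ty : Int) (size : Int), Dom_calculate_quadrant x y tx ty size → Pre_calculate_quadrant x y tx ty size → Spec_calculate_quadrant x y tx ty size (calculate_quadrant x y tx ty size)

-- ===== LEMMAS AND PROOFS =====

theorem join_cqLoop (x y tx ty size : Int) (digits : List String) :
    String.join (cqLoop x y tx ty size digits)
      = String.join digits ++ calculate_quadrant x y tx ty size := by
  fun_induction cqLoop x y tx ty size digits with
  | case1 x y size digits hsz =>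
      rw [calculate_quadrant, if_pos hsz]
      simp
  | case2 x y size digits hsz offset h1 h2 ih =>
      conv_rhs => rw [calculate_quadrant]
      rw [if_neg hsz]
      show _ = _ ++ if tx ≥ x + offset ∧ ty < y + offset then _ else _
      rw [if_pos ⟨h1, h2⟩]
      rw [ih]
      simp [String.join, String.append_assoc, offset,
            PySem.Int.floordiv_eq_ediv_of_pos (show (0:Int) < 2 by omega)]
  | case3 x y size digits hsz offset h1 h2 ih =>
      conv_rhs => rw [calculate_quadrant]
      rw [if_neg hsz]
      show _ = _ ++ if tx ≥ x + offset ∧ ty < y + offset then _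
        else if tx < x + offset ∧ ty < y + offset then _
        else if tx < x + offset ∧ ty ≥ y + offset then _ else _
      rw [if_neg (by omega), if_neg (by omega), if_neg (by omega)]
      rw [ih]
      simp [String.join, String.append_assoc, offset,
            PySem.Int.floordiv_eq_ediv_of_pos (show (0:Int) < 2 by omega)]
  | case4 x y size digits hsz offset h1 h2 ih =>
      conv_rhs => rw [calculate_quadrant]
      rw [if_neg hsz]
      show _ = _ ++ if tx ≥ x + offset ∧ ty < y + offset then _
        else if tx < x + offset ∧ ty < y + offset then _ else _
      rw [if_neg (by omega), if_pos ⟨by omega, h2⟩]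
      rw [ih]
      simp [String.join, String.append_assoc, offset,
            PySem.Int.floordiv_eq_ediv_of_pos (show (0:Int) < 2 by omega)]
  | case5 x y size digits hsz offset h1 h2 ih =>
      conv_rhs => rw [calculate_quadrant]
      rw [if_neg hsz]
      show _ = _ ++ if tx ≥ x + offset ∧ ty < y + offset then _
        else if tx < x + offset ∧ ty < y + offset then _
        else if tx < x + offset ∧ ty ≥ y + offset then _ else _
      rw [if_neg (by omega), if_neg (by omega), if_pos ⟨by omega, by omega⟩]
      rw [ih]
      simp [String.join, String.append_assoc, offset,
            PySem.Int.floordiv_eq_ediv_of_pos (show (0:Int) < 2 by omega)]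

-- ===== VERDICT (by name: the statement is the Claim_ definition above) =====
theorem calculate_quadrant_spec : Claim_equal_calculate_quadrant := by
  intro x y tx ty size _ _
  unfold Spec_calculate_quadrant calculate_quadrant_alt
  rw [join_cqLoop]
  simp [String.join]
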